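-- pv_equiv track=rewrite | github.com/Geigle/MtpManager | mm.py | TryGetVorbisTag
-- ===== SOURCE A (Python) =====
-- def TryGetVorbisTag(tag_dict, tag_id):
--     """
--     Fetch a Vorbis tag from a dictionary.
--     Provides alternative values if not found.
--     """
--     if tag_dict.__contains__(tag_id):
--         this_tag = ""
--         if tag_id == 'TRACKNUMBER' and tag_dict[tag_id][0].__contains__('/'):
--             this_tag = tag_dict[tag_id][0].split('/')[0]
--         else:
--             this_tag = tag_dict[tag_id][0]
--         if len(this_tag) < 2:
--             this_tag = "0"+this_tag
--         return this_tag
--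
--     else:
--         if tag_id == 'TRACKNUMBER' or tag_id == 'DISCNUMBER':
--             return "1"
--         elif tag_id == 'ALBUMARTIST' or tag_id == 'COMPOSER':
--             return TryGetVorbisTag(tag_dict, 'ARTIST')
--         elif tag_id == 'ARTIST':
--             return "Unknown Artist"
--         elif tag_id == 'DATE':
--             return TryGetVorbisTag(tag_dict, 'YEAR')
--         elif tag_id == 'ALBUM':
--             return "Unknown Album"
--         elif tag_id == 'TITLE':
--             return "Unknown Title"
--         else:
--             return ""
-- ===== SOURCE B (Python) =====
-- def TryGetVorbisTag(tag_dict, tag_id):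
--     """
--     Fetch a Vorbis tag from a dictionary.
--     Provides alternative values if not found.
--     Table-driven: fallback chain + defaults tables instead of recursion.
--     """
--     fallbacks = {'ALBUMARTIST': 'ARTIST', 'COMPOSER': 'ARTIST', 'DATE': 'YEAR'}
--     defaults = {'TRACKNUMBER': '1', 'DISCNUMBER': '1', 'ARTIST': 'Unknown Artist',
--                 'ALBUM': 'Unknown Album', 'TITLE': 'Unknown Title'}
--     current = tag_id
--     while current not in tag_dict:
--         if current in fallbacks:
--             current = fallbacks[current]
--         else:
--             return defaults.get(current, '')
--     value = tag_dict[current][0]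
--     if current == 'TRACKNUMBER' and '/' in value:
--         value = value.split('/')[0]
--     if len(value) < 2:
--         value = '0' + value
--     return value
-- ===== Notes on version B (the rewrite author's own statement) =====
-- stated objective: alternative
-- what changed: Replaces A's self-recursion and if/elif fallback cascade with a single table-driven loop: a fallbacks dict (ALBUMARTIST/COMPOSER->ARTIST, DATE->YEAR) and a defaults dict, walked by 'while current not in tag_dict', then one shared formatting step.
import Mathlib
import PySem

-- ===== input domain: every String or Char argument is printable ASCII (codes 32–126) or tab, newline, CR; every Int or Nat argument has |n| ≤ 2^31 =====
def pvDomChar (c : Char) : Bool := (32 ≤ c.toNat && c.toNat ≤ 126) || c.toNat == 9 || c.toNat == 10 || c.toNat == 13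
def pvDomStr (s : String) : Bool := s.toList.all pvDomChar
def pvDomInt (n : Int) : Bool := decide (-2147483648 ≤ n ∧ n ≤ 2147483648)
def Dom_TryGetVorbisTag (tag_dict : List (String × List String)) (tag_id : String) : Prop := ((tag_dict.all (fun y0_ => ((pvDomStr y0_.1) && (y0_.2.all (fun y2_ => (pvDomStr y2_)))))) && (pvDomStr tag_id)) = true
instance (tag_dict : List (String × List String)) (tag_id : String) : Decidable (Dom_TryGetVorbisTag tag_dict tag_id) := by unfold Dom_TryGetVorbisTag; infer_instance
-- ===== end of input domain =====

-- B replaces A's self-recursion and if/elif fallback cascade with a table-driven fallback/default lookup loop (alternative decomposition, same cost).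


-- termination measure for the (depth ≤ 1) fallback recursion; cited by both ports' decreasing_by
def pvRank (tag_id : String) : Nat :=
  if tag_id = "ALBUMARTIST" ∨ tag_id = "COMPOSER" ∨ tag_id = "DATE" then 1 else 0

-- ===== PORT A =====
-- literal transliteration of A: membership test, TRACKNUMBER '/' split, zero-pad, then the if/elif fallback cascade with self-recursion.
-- tag_dict[...][0] is PySem.List.pyGet?; it is none exactly where Python raises IndexError — those inputs are excluded by Pre_ below.
def TryGetVorbisTag (tag_dict : List (String × List String)) (tag_id : String) : String :=
  let d := PySem.Dict.ofList tag_dict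
  if d.contains tag_id then
    let this_tag :=
      if tag_id == "TRACKNUMBER" && PySem.Str.isIn "/" ((PySem.List.pyGet? (d.getD tag_id []) 0).getD "") then
        -- tag_dict[tag_id][0].split('/')[0]
        ((PySem.Str.split? ((PySem.List.pyGet? (d.getD tag_id []) 0).getD "") "/").getD []).headD ""
      else
        (PySem.List.pyGet? (d.getD tag_id []) 0).getD ""
    if PySem.Str.len this_tag < 2 then "0" ++ this_tag else this_tag
  else if tag_id == "TRACKNUMBER" || tag_id == "DISCNUMBER" then "1"
  else if _h : tag_id == "ALBUMARTIST" || tag_id == "COMPOSER" then TryGetVorbisTag tag_dict "ARTIST"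
  else if tag_id == "ARTIST" then "Unknown Artist"
  else if _h2 : tag_id == "DATE" then TryGetVorbisTag tag_dict "YEAR"
  else if tag_id == "ALBUM" then "Unknown Album"
  else if tag_id == "TITLE" then "Unknown Title"
  else ""
termination_by pvRank tag_id
decreasing_by
  · simp only [Bool.or_eq_true, beq_iff_eq] at _h
    rcases _h with rfl | rfl <;> simp [pvRank]
  · simp only [beq_iff_eq] at _h2; subst _h2; simp [pvRank]

-- ===== PORT B =====
def pvFallbacks : PySem.Dict String String :=
  PySem.Dict.ofList [("ALBUMARTIST", "ARTIST"), ("COMPOSER", "ARTIST"), ("DATE", "YEAR")]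

def pvDefaults : PySem.Dict String String :=
  PySem.Dict.ofList [("TRACKNUMBER", "1"), ("DISCNUMBER", "1"), ("ARTIST", "Unknown Artist"),
                     ("ALBUM", "Unknown Album"), ("TITLE", "Unknown Title")]

-- the formatting B applies once the loop lands on a present key
def pvFormat (current : String) (vs : List String) : String :=
  let value := (PySem.List.pyGet? vs 0).getD ""
  let value :=
    if current == "TRACKNUMBER" && PySem.Str.isIn "/" value then
      ((PySem.Str.split? value "/").getD []).headD ""
    else value
  if PySem.Str.len value < 2 then "0" ++ value else value

-- termination helper for B's loop: following the fallback table strictly decreases pvRank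
theorem pvFallbacks_rank {current nxt : String} (h : pvFallbacks.get? current = some nxt) :
    pvRank nxt < pvRank current := by
  have hfb : pvFallbacks = PySem.Dict.mk [("ALBUMARTIST", "ARTIST"), ("COMPOSER", "ARTIST"), ("DATE", "YEAR")] := by rfl
  rw [hfb] at h
  simp only [PySem.Dict.get?_mk_cons] at h
  split_ifs at h with h1 h2 h3
  · cases h; simp only [beq_iff_eq] at h1; subst h1; simp [pvRank]
  · cases h; simp only [beq_iff_eq] at h2; subst h2; simp [pvRank]
  · cases h; simp only [beq_iff_eq] at h3; subst h3; simp [pvRank]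
  · simp [PySem.Dict.get?] at h

-- B's 'while current not in tag_dict' loop
def pvResolve (d : PySem.Dict String (List String)) (current : String) : String :=
  match d.get? current with
  | some vs => pvFormat current vs
  | none =>
    match _h : pvFallbacks.get? current with
    | some nxt => pvResolve d nxt
    | none => pvDefaults.getD current ""
termination_by pvRank current
decreasing_by exact pvFallbacks_rank _h

def TryGetVorbisTag_alt (tag_dict : List (String × List String)) (tag_id : String) : String :=
  pvResolve (PySem.Dict.ofList tag_dict) tag_id

-- ===== PRECONDITION & SPEC =====
-- Pre_ excludes exactly the inputs on which A (and B) raise IndexError: the key the fallback chain lands on is present but mapped to an empty list.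
def Pre_TryGetVorbisTag (tag_dict : List (String × List String)) (tag_id : String) : Prop :=
  (PySem.Dict.ofList tag_dict).get? tag_id ≠ some [] ∧
  ((PySem.Dict.ofList tag_dict).contains tag_id = false ∧ (tag_id = "ALBUMARTIST" ∨ tag_id = "COMPOSER") →
    (PySem.Dict.ofList tag_dict).get? "ARTIST" ≠ some []) ∧
  ((PySem.Dict.ofList tag_dict).contains tag_id = false ∧ tag_id = "DATE" →
    (PySem.Dict.ofList tag_dict).get? "YEAR" ≠ some [])
instance (tag_dict : List (String × List String)) (tag_id : String) : Decidable (Pre_TryGetVorbisTag tag_dict tag_id) := by unfold Pre_TryGetVorbisTag; infer_instance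

def pvWitness_TryGetVorbisTag : (List (String × List String)) × String :=
  ([("TRACKNUMBER", ["3/9"]), ("ARTIST", ["Ann"])], "TRACKNUMBER")

def Spec_TryGetVorbisTag (tag_dict : List (String × List String)) (tag_id : String) (out : String) : Prop := out = TryGetVorbisTag_alt tag_dict tag_id
instance (tag_dict : List (String × List String)) (tag_id : String) (out : String) : Decidable (Spec_TryGetVorbisTag tag_dict tag_id out) := by unfold Spec_TryGetVorbisTag; infer_instance

-- ===== CLAIM (what is proved, stated in full; the proofs are below) =====
def Claim_equal_TryGetVorbisTag : Prop := ∀ (tag_dict : List (String × List String)) (tag_id : String), Dom_TryGetVorbisTag tag_dict tag_id → Pre_TryGetVorbisTag tag_dict tag_id → Spec_TryGetVorbisTag tag_dict tag_id (TryGetVorbisTag tag_dict tag_id)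

-- ===== LEMMAS AND PROOFS =====

-- the fallback table holds none of the non-special keys
theorem pv_fb_none {t : String} (h1 : t ≠ "ALBUMARTIST") (h2 : t ≠ "COMPOSER") (h3 : t ≠ "DATE") :
    pvFallbacks.get? t = none := by
  have hfb : pvFallbacks = PySem.Dict.mk [("ALBUMARTIST", "ARTIST"), ("COMPOSER", "ARTIST"), ("DATE", "YEAR")] := by rfl
  rw [hfb]
  simp [PySem.Dict.get?, Ne.symm h1, Ne.symm h2, Ne.symm h3]

-- the defaults table yields '' on the non-special keys
theorem pv_df_none {t : String} (h1 : t ≠ "TRACKNUMBER") (h2 : t ≠ "DISCNUMBER") (h3 : t ≠ "ARTIST")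
    (h4 : t ≠ "ALBUM") (h5 : t ≠ "TITLE") : pvDefaults.getD t "" = "" := by
  have hdf : pvDefaults = PySem.Dict.mk [("TRACKNUMBER", "1"), ("DISCNUMBER", "1"), ("ARTIST", "Unknown Artist"), ("ALBUM", "Unknown Album"), ("TITLE", "Unknown Title")] := by rfl
  rw [hdf, PySem.Dict.getD_eq_get?_getD]
  simp [PySem.Dict.get?, Ne.symm h1, Ne.symm h2, Ne.symm h3, Ne.symm h4, Ne.symm h5]

-- the equivalence at the two fallback targets (where A's recursion bottoms out)
theorem pvEquiv_lit (tag_dict : List (String × List String)) (tag_id : String)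
    (hlit : tag_id = "ARTIST" ∨ tag_id = "YEAR") :
    TryGetVorbisTag tag_dict tag_id = pvResolve (PySem.Dict.ofList tag_dict) tag_id := by
  rw [TryGetVorbisTag, pvResolve]
  cases hg : (PySem.Dict.ofList tag_dict).get? tag_id with
  | some vs =>
    have hc : (PySem.Dict.ofList tag_dict).contains tag_id = true := by
      rw [PySem.Dict.contains_eq_isSome_get?, hg]; rfl
    simp [hc, pvFormat, PySem.Dict.getD_eq_get?_getD, hg]
  | none =>
    have hc : (PySem.Dict.ofList tag_dict).contains tag_id = false := by
      rw [PySem.Dict.contains_eq_isSome_get?, hg]; rfl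
    simp only [hc, Bool.false_eq_true, if_false]
    rcases hlit with rfl | rfl <;> rfl

theorem pvEquiv (tag_dict : List (String × List String)) (tag_id : String) :
    TryGetVorbisTag tag_dict tag_id = pvResolve (PySem.Dict.ofList tag_dict) tag_id := by
  rw [TryGetVorbisTag, pvResolve]
  cases hg : (PySem.Dict.ofList tag_dict).get? tag_id with
  | some vs =>
    have hc : (PySem.Dict.ofList tag_dict).contains tag_id = true := by
      rw [PySem.Dict.contains_eq_isSome_get?, hg]; rfl
    simp [hc, pvFormat, PySem.Dict.getD_eq_get?_getD, hg]
  | none =>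
    have hc : (PySem.Dict.ofList tag_dict).contains tag_id = false := by
      rw [PySem.Dict.contains_eq_isSome_get?, hg]; rfl
    simp only [hc, Bool.false_eq_true, if_false]
    by_cases h1 : tag_id = "TRACKNUMBER"
    · subst h1; rfl
    by_cases h2 : tag_id = "DISCNUMBER"
    · subst h2; rfl
    by_cases h3 : tag_id = "ALBUMARTIST"
    · subst h3
      show TryGetVorbisTag tag_dict "ARTIST" = pvResolve (PySem.Dict.ofList tag_dict) "ARTIST"
      exact pvEquiv_lit tag_dict "ARTIST" (Or.inl rfl)
    by_cases h4 : tag_id = "COMPOSER"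
    · subst h4
      show TryGetVorbisTag tag_dict "ARTIST" = pvResolve (PySem.Dict.ofList tag_dict) "ARTIST"
      exact pvEquiv_lit tag_dict "ARTIST" (Or.inl rfl)
    by_cases h5 : tag_id = "ARTIST"
    · subst h5; rfl
    by_cases h6 : tag_id = "DATE"
    · subst h6
      show TryGetVorbisTag tag_dict "YEAR" = pvResolve (PySem.Dict.ofList tag_dict) "YEAR"
      exact pvEquiv_lit tag_dict "YEAR" (Or.inr rfl)
    by_cases h7 : tag_id = "ALBUM"
    · subst h7; rfl
    by_cases h8 : tag_id = "TITLE"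
    · subst h8; rfl
    -- generic tag: A returns "", B falls through both tables
    cases hfb : pvFallbacks.get? tag_id with
    | some nxt => rw [pv_fb_none h3 h4 h6] at hfb; cases hfb
    | none =>
      simp only [beq_iff_eq, h1, h2, h3, h4, h5, h6, h7, h8, Bool.or_eq_true, or_self,
        if_false, dif_neg, not_false_iff]
      rw [pv_df_none h1 h2 h5 h7 h8]

-- ===== VERDICT (by name: the statement is the Claim_ definition above) =====
theorem TryGetVorbisTag_spec : Claim_equal_TryGetVorbisTag := by
  intro tag_dict tag_id _ _
  unfold Spec_TryGetVorbisTag TryGetVorbisTag_alt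
  exact pvEquiv tag_dict tag_id
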